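-- pv_equiv track=rewrite | github.com/kingther94c/market_helper | market_helper/regimes/axes.py | compute_duration_days
-- ===== SOURCE A (Python) =====
-- from typing import Any, Iterable, List, Sequence
--
-- def compute_duration_days(quadrants: Iterable[str]) -> List[int]:
--     """For each position, return the run length ending at that position."""
--     out: List[int] = []
--     current: str | None = None
--     run = 0
--     for label in quadrants:
--         if label == current:
--             run += 1
--         else:
--             current = label
--             run = 1
--         out.append(run)
--     return out
-- ===== SOURCE B (Python) =====
-- from typing import Iterable, List
--
-- def compute_duration_days(quadrants: Iterable[str]) -> List[int]:
--     """For each position, return the run length ending at that position."""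
--     q = list(quadrants)
--
--     def rec(lo: int, hi: int) -> List[int]:
--         # Divide and conquer: solve each half independently, then extend the
--         # run crossing the midpoint into the right half's first run.
--         if hi - lo <= 1:
--             return [1] * (hi - lo)
--         mid = (lo + hi) // 2
--         left = rec(lo, mid)
--         right = rec(mid, hi)
--         if q[mid] == q[mid - 1]:
--             carry = left[-1]
--             k = 0
--             while k < len(right) and right[k] == k + 1:
--                 right[k] += carry
--                 k += 1
--         return left + right
--
--     return rec(0, len(q))
-- ===== Notes on version B (the rewrite author's own statement) =====
-- stated objective: alternative
-- what changed: Replaces A's left-to-right current/run state machine with a divide-and-conquer recursion: each half is solved independently and the merge step extends the run crossing the midpoint into the right half's first run.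
import Mathlib
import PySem

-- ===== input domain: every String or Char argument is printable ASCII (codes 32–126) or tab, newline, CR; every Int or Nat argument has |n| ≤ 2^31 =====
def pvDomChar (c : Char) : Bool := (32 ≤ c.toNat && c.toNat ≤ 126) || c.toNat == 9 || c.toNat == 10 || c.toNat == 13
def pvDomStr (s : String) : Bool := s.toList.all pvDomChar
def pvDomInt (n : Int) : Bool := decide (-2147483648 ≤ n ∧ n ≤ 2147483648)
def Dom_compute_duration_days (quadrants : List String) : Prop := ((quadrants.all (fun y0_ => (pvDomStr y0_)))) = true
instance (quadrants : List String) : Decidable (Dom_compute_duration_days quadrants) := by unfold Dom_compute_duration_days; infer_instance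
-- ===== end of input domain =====

-- B replaces A's left-to-right current/run state machine with a divide-and-conquer
-- recursion whose merge step extends the run crossing the midpoint (objective: alternative).

-- ===== PORT A =====
-- A's for-loop: state = (out, current, run); each step appends the run length to out
def pvA_loop : List String → List Int → Option String → Int → List Int
  | [], out, _, _ => out
  | label :: rest, out, current, run =>
      if some label = current then
        pvA_loop rest (out ++ [run + 1]) (some label) (run + 1)
      else
        pvA_loop rest (out ++ [1]) (some label) 1

def compute_duration_days (quadrants : List String) : List Int :=
  pvA_loop quadrants [] none 0

-- ===== PORT B =====
-- the merge fix-up: 'while k < len(right) and right[k] == k + 1: right[k] += carry; k += 1'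
def pvFix (c : Int) : Nat → List Int → List Int
  | _, [] => []
  | k, v :: vs => if v = (k : Int) + 1 then (v + c) :: pvFix c (k + 1) vs else v :: vs

-- 'def rec(lo, hi)' of Source B, with structural recursion on a fuel ≥ hi - lo
-- (totality plumbing only); all indices are in range, so q[i] is ported as q.getD i ""
def pvRec (q : List String) : Nat → Nat → Nat → List Int
  | 0, lo, hi => List.replicate (hi - lo) 1
  | fuel + 1, lo, hi =>
    if hi - lo ≤ 1 then List.replicate (hi - lo) 1
    else
      let mid := (lo + hi) / 2
      let left := pvRec q fuel lo mid
      let right := pvRec q fuel mid hi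
      if q.getD mid "" = q.getD (mid - 1) "" then
        left ++ pvFix (left.getLastD 0) 0 right
      else
        left ++ right

def compute_duration_days_alt (quadrants : List String) : List Int :=
  pvRec quadrants quadrants.length 0 quadrants.length

-- ===== PRECONDITION & SPEC =====
def Spec_compute_duration_days (quadrants : List String) (out : List Int) : Prop := out = compute_duration_days_alt quadrants
instance (quadrants : List String) (out : List Int) : Decidable (Spec_compute_duration_days quadrants out) := by unfold Spec_compute_duration_days; infer_instance

-- ===== CLAIM (what is proved, stated in full; the proofs are below) =====
def Claim_equal_compute_duration_days : Prop := ∀ (quadrants : List String), Dom_compute_duration_days quadrants → Spec_compute_duration_days quadrants (compute_duration_days quadrants)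

-- ===== LEMMAS AND PROOFS =====

-- canonical recursive description of the run-length-ending-at-each-position list
def pvEgo (x : String) (n : Int) : List String → List Int
  | [] => []
  | y :: ys => if y = x then (n + 1) :: pvEgo x (n + 1) ys else 1 :: pvEgo y 1 ys

def pvSpec : List String → List Int
  | [] => []
  | x :: xs => 1 :: pvEgo x 1 xs

-- A's loop only appends to out
theorem pvA_loop_out (qs : List String) (out : List Int) (c : Option String) (r : Int) :
    pvA_loop qs out c r = out ++ pvA_loop qs [] c r := by
  induction qs generalizing out c r with
  | nil => simp [pvA_loop]
  | cons x xs ih =>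
    simp only [pvA_loop]
    split_ifs with h
    · rw [ih (out ++ [r + 1]), ih ([] ++ [r + 1])]; simp
    · rw [ih (out ++ [1]), ih ([] ++ [1])]; simp

theorem pvA_loop_ego (qs : List String) (x : String) (n : Int) :
    pvA_loop qs [] (some x) n = pvEgo x n qs := by
  induction qs generalizing x n with
  | nil => simp [pvA_loop, pvEgo]
  | cons y ys ih =>
    simp only [pvA_loop, pvEgo]
    by_cases h2 : y = x
    · subst h2
      rw [if_pos rfl, if_pos rfl, pvA_loop_out, ih]
      simp
    · rw [if_neg (by simpa using h2), if_neg h2, pvA_loop_out, ih]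
      simp

theorem pvA_spec (qs : List String) : compute_duration_days qs = pvSpec qs := by
  cases qs with
  | nil => rfl
  | cons x xs =>
    show pvA_loop (x :: xs) [] none 0 = 1 :: pvEgo x 1 xs
    rw [pvA_loop, if_neg (by simp), pvA_loop_out, pvA_loop_ego]
    simp

-- state after running ego over u from (x, n)
def pvSt (u : List String) (x : String) (n : Int) : String × Int :=
  u.foldl (fun p y => if y = p.1 then (p.1, p.2 + 1) else (y, 1)) (x, n)

theorem pvEgo_append (u v : List String) (x : String) (n : Int) :
    pvEgo x n (u ++ v) = pvEgo x n u ++ pvEgo (pvSt u x n).1 (pvSt u x n).2 v := by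
  induction u generalizing x n with
  | nil => simp [pvEgo, pvSt]
  | cons y ys ih =>
    simp only [List.cons_append, pvEgo, pvSt, List.foldl_cons]
    split_ifs with h
    · subst h; simpa [pvSt] using congrArg (List.cons (n + 1)) (ih y (n + 1))
    · simpa [pvSt, h] using congrArg (List.cons 1) (ih y 1)

theorem pvSt_fst (u : List String) (x : String) (n : Int) :
    (pvSt u x n).1 = u.getLastD x := by
  induction u generalizing x n with
  | nil => rfl
  | cons y ys ih =>
    simp only [pvSt, List.foldl_cons, List.getLastD_cons]
    split_ifs with h
    · subst h; exact ih y (n + 1)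
    · exact ih y 1

theorem pvSt_snd (u : List String) (x : String) (n : Int) :
    (pvSt u x n).2 = (pvEgo x n u).getLastD n := by
  induction u generalizing x n with
  | nil => rfl
  | cons y ys ih =>
    simp only [pvSt, List.foldl_cons, pvEgo]
    split_ifs with h
    · subst h
      rw [List.getLastD_cons]
      exact ih y (n + 1)
    · rw [List.getLastD_cons]
      exact ih y 1

theorem pvSpec_append (u v : List String) (hu : u ≠ []) :
    pvSpec (u ++ v) = pvSpec u ++ pvEgo (u.getLastD "") ((pvSpec u).getLastD 0) v := by
  cases u with
  | nil => exact absurd rfl hu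
  | cons a u' =>
    simp only [List.cons_append, pvSpec, List.getLastD_cons]
    rw [pvEgo_append, pvSt_fst, pvSt_snd]

-- the fix-up adds the carry exactly over the first run
theorem pvFix_ego (zs : List String) (y : String) (k : Nat) (hk : 1 ≤ k) (c : Int) :
    pvFix c k (pvEgo y (k : Int) zs) = pvEgo y ((k : Int) + c) zs := by
  induction zs generalizing k with
  | nil => simp [pvEgo, pvFix]
  | cons z zs ih =>
    simp only [pvEgo]
    split_ifs with h
    · have h2 := ih (k + 1) (by omega)
      push_cast at h2
      rw [pvFix, if_pos rfl, h2]
      ring_nf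
    · have h1 : ¬ ((1 : Int) = (k : Int) + 1) := by omega
      simp only [pvFix, if_neg h1]

-- the fix-up applied to a fresh right half equals continuing the run with carry m
theorem pvFix_spec_cons (y : String) (zs : List String) (m : Int) :
    pvFix m 0 (pvSpec (y :: zs)) = pvEgo y m (y :: zs) := by
  have h1 := pvFix_ego zs y 1 le_rfl m
  norm_num at h1
  show pvFix m 0 (1 :: pvEgo y 1 zs) = pvEgo y m (y :: zs)
  rw [pvFix, if_pos (by norm_num), pvEgo, if_pos rfl]
  norm_num [h1, add_comm]

-- segment of q from lo (incl.) to hi (excl.)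
def pvSeg (q : List String) (lo hi : Nat) : List String := (q.drop lo).take (hi - lo)

theorem pvSeg_split (q : List String) (lo mid hi : Nat) (h1 : lo ≤ mid) (h2 : mid ≤ hi) :
    pvSeg q lo hi = pvSeg q lo mid ++ pvSeg q mid hi := by
  simp only [pvSeg]
  rw [show hi - lo = (mid - lo) + (hi - mid) by omega, List.take_add, List.drop_drop,
    show lo + (mid - lo) = mid by omega]

theorem pvSeg_length (q : List String) (lo hi : Nat) (_h1 : lo ≤ hi) (h2 : hi ≤ q.length) :
    (pvSeg q lo hi).length = hi - lo := by
  simp [pvSeg]; omega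

theorem pvSeg_ne_nil (q : List String) (lo hi : Nat) (h1 : lo < hi) (h2 : hi ≤ q.length) :
    pvSeg q lo hi ≠ [] := by
  intro h
  have := congrArg List.length h
  rw [pvSeg_length q lo hi (by omega) h2] at this
  simp at this
  omega

theorem pvSeg_cons (q : List String) (mid hi : Nat) (h1 : mid < hi) (h2 : hi ≤ q.length) :
    pvSeg q mid hi = q.getD mid "" :: pvSeg q (mid + 1) hi := by
  have hm : mid < q.length := by omega
  simp only [pvSeg]
  rw [List.drop_eq_getElem_cons hm,
    show hi - mid = (hi - (mid + 1)) + 1 by omega, List.take_succ_cons,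
    List.getD_eq_getElem q "" hm]

theorem pvSeg_getLastD (q : List String) (lo mid : Nat) (h1 : lo < mid) (h2 : mid ≤ q.length) :
    (pvSeg q lo mid).getLastD "" = q.getD (mid - 1) "" := by
  have hl : (pvSeg q lo mid).length = mid - lo := pvSeg_length q lo mid (by omega) h2
  rw [List.getLastD_eq_getLast?, List.getLast?_eq_getElem?, hl]
  simp only [pvSeg]
  rw [List.getElem?_take_of_lt (by omega), List.getElem?_drop,
    show lo + (mid - lo - 1) = mid - 1 by omega, List.getD_eq_getElem?_getD]

theorem pvRec_spec (n : Nat) (q : List String) (lo hi : Nat) (hn : hi - lo ≤ n)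
    (h1 : lo ≤ hi) (h2 : hi ≤ q.length) :
    pvRec q n lo hi = pvSpec (pvSeg q lo hi) := by
  induction n generalizing lo hi with
  | zero =>
    have he : hi - lo = 0 := by omega
    rw [pvRec, he]
    simp only [pvSeg, he, List.take_zero, List.replicate_zero, pvSpec]
  | succ n ih =>
    by_cases hsm : hi - lo ≤ 1
    · rw [pvRec, if_pos hsm]
      rcases Nat.lt_or_ge (hi - lo) 1 with hc | hc
      · have he : hi - lo = 0 := by omega
        rw [he]
        simp only [pvSeg, he, List.take_zero, List.replicate_zero, pvSpec]
      · have he : hi - lo = 1 := by omega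
        have hl : (pvSeg q lo hi).length = 1 := by rw [pvSeg_length q lo hi h1 h2, he]
        obtain ⟨a, ha⟩ := List.length_eq_one_iff.mp hl
        rw [he, ha]
        simp [pvSpec, pvEgo]
    · rw [pvRec, if_neg hsm]
      -- (the fuel n suffices for both halves)
      have hm1 : lo < (lo + hi) / 2 := by omega
      have hm2 : (lo + hi) / 2 < hi := by omega
      set mid := (lo + hi) / 2 with hmid
      show (if q.getD mid "" = q.getD (mid - 1) "" then
            pvRec q n lo mid ++ pvFix ((pvRec q n lo mid).getLastD 0) 0 (pvRec q n mid hi)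
          else pvRec q n lo mid ++ pvRec q n mid hi) = pvSpec (pvSeg q lo hi)
      rw [ih lo mid (by omega) (by omega) (by omega), ih mid hi (by omega) (by omega) h2,
        pvSeg_split q lo mid hi (by omega) (by omega),
        pvSpec_append _ _ (pvSeg_ne_nil q lo mid hm1 (by omega)),
        pvSeg_getLastD q lo mid hm1 (by omega), pvSeg_cons q mid hi hm2 h2]
      by_cases hq : q.getD mid "" = q.getD (mid - 1) ""
      · rw [if_pos hq]
        congr 1
        rw [← hq]
        exact pvFix_spec_cons _ _ _
      · rw [if_neg hq]
        congr 1
        rw [pvEgo, if_neg hq, pvSpec]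

-- ===== VERDICT (by name: the statement is the Claim_ definition above) =====
theorem compute_duration_days_spec : Claim_equal_compute_duration_days := by
  intro qs _
  show compute_duration_days qs = compute_duration_days_alt qs
  rw [pvA_spec, compute_duration_days_alt,
    pvRec_spec qs.length qs 0 qs.length (by omega) (by omega) le_rfl]
  simp [pvSeg]
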